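-- pv_equiv track=rewrite | github.com/alexispurslane/CMPSC132 | LAB3.py | thirtyTwos
-- ===== SOURCE A (Python) =====
-- def thirtyTwos(n):
--     '''
--         >>> thirtyTwos(432601)
--         1
--         >>> thirtyTwos(132432601)
--         2
--         >>> thirtyTwos(78)
--         0
--     '''
--     if n == 0:
--         return 0
--     else:
--         lastDigit = n % 10
--         nextDigit = (n // 10) % 10
--         if lastDigit == 2 and nextDigit == 3:
--             return 1 + thirtyTwos(n // 10)
--         else:
--             return thirtyTwos(n // 10)
-- ===== SOURCE B (Python) =====
-- def thirtyTwos(n):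
--     return str(n).count('32')
-- ===== Notes on version B (the rewrite author's own statement) =====
-- stated objective: simpler
-- what changed: Replaced the per-digit recursion with mod/floordiv arithmetic by a one-line substring count over the decimal string representation.
import Mathlib
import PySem

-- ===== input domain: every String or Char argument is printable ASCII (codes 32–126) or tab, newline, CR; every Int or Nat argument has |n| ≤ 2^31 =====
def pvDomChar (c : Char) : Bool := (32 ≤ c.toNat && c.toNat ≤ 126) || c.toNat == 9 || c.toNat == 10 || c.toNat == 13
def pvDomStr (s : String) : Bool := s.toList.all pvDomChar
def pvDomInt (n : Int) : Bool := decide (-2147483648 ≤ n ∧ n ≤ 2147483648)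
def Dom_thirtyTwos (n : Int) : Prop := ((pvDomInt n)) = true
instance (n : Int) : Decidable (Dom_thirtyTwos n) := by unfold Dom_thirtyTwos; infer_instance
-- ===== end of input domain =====

-- B replaces A's per-digit recursion by a single substring count over str(n); objective: simpler.


-- ===== PORT A =====
-- Literal transliteration of A; the 'n < 0' guard only makes the recursion total
-- (Python never returns there: it hits the recursion limit), those inputs are outside Pre_.
def thirtyTwos (n : Int) : Int :=
  if n = 0 then 0
  else if n < 0 then 0
  else
    let lastDigit := PySem.Int.mod n 10
    let nextDigit := PySem.Int.mod (PySem.Int.floordiv n 10) 10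
    if lastDigit = 2 ∧ nextDigit = 3 then 1 + thirtyTwos (PySem.Int.floordiv n 10)
    else thirtyTwos (PySem.Int.floordiv n 10)
termination_by n.toNat
decreasing_by
  all_goals
    rw [PySem.Int.floordiv_eq_ediv_of_pos (by omega : (0:Int) < 10)]
    omega

-- ===== PORT B =====
def thirtyTwos_alt (n : Int) : Int :=
  ((PySem.Str.count (PySem.Int.toStr n) "32" : Nat) : Int)

-- ===== PRECONDITION & SPEC =====
-- Pre_ excludes exactly the negative inputs, on which Python A raises RecursionError.
def Pre_thirtyTwos (n : Int) : Prop := 0 ≤ n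
instance (n : Int) : Decidable (Pre_thirtyTwos n) := by unfold Pre_thirtyTwos; infer_instance
def pvWitness_thirtyTwos : Int := (432601)

def Spec_thirtyTwos (n : Int) (out : Int) : Prop := out = thirtyTwos_alt n
instance (n : Int) (out : Int) : Decidable (Spec_thirtyTwos n out) := by unfold Spec_thirtyTwos; infer_instance

-- ===== CLAIM (what is proved, stated in full; the proofs are below) =====
def Claim_equal_thirtyTwos : Prop := ∀ (n : Int), Dom_thirtyTwos n → Pre_thirtyTwos n → Spec_thirtyTwos n (thirtyTwos n)
-- ===== LEMMAS AND PROOFS =====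

-- number of adjacent positions carrying '3' then '2' in a character list
def pairsN : List Char → Nat
  | a :: b :: t => (if a = '3' ∧ b = '2' then 1 else 0) + pairsN (b :: t)
  | _ => 0

theorem toDigitsCore_acc (fuel : Nat) : ∀ (n : Nat) (l : List Char),
    Nat.toDigitsCore 10 fuel n l = Nat.toDigitsCore 10 fuel n [] ++ l := by
  induction fuel with
  | zero => intro n l; simp [Nat.toDigitsCore]
  | succ f ih =>
    intro n l
    simp only [Nat.toDigitsCore]
    by_cases h : n / 10 = 0
    · simp [h]
    · simp only [h]
      rw [ih (n / 10) (Nat.digitChar (n % 10) :: l), ih (n / 10) [Nat.digitChar (n % 10)]]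
      simp

theorem toDigitsCore_fuel : ∀ (n f1 f2 : Nat) (l : List Char), n < f1 → n < f2 →
    Nat.toDigitsCore 10 f1 n l = Nat.toDigitsCore 10 f2 n l := by
  intro n
  induction n using Nat.strong_induction_on with
  | _ n ih =>
    intro f1 f2 l h1 h2
    obtain ⟨g1, rfl⟩ : ∃ g, f1 = g + 1 := ⟨f1 - 1, by omega⟩
    obtain ⟨g2, rfl⟩ : ∃ g, f2 = g + 1 := ⟨f2 - 1, by omega⟩
    simp only [Nat.toDigitsCore]
    by_cases h : n / 10 = 0
    · simp [h]
    · simp only [if_neg h]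
      exact ih (n / 10) (by omega) g1 g2 _ (by omega) (by omega)

theorem toDigits_lt10 (m : Nat) (h : m < 10) : Nat.toDigits 10 m = [Nat.digitChar m] := by
  have : m / 10 = 0 := Nat.div_eq_of_lt h
  simp [Nat.toDigits, Nat.toDigitsCore, this, Nat.mod_eq_of_lt h]

theorem toDigits_ge10 (m : Nat) (h : 10 ≤ m) :
    Nat.toDigits 10 m = Nat.toDigits 10 (m / 10) ++ [Nat.digitChar (m % 10)] := by
  have hne : m / 10 ≠ 0 := by omega
  show Nat.toDigitsCore 10 (m + 1) m [] = _
  simp only [Nat.toDigitsCore, if_neg hne]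
  rw [toDigitsCore_acc]
  rw [toDigitsCore_fuel (m / 10) m (m / 10 + 1) [] (by omega) (by omega)]
  rfl

theorem getLast?_toDigits (m : Nat) :
    (Nat.toDigits 10 m).getLast? = some (Nat.digitChar (m % 10)) := by
  by_cases h : m < 10
  · rw [toDigits_lt10 m h, Nat.mod_eq_of_lt h]; rfl
  · rw [toDigits_ge10 m (by omega)]
    simp

theorem digitChar_eq_three (d : Nat) (h : d < 10) : (Nat.digitChar d = '3') ↔ d = 3 := by
  interval_cases d <;> simp [Nat.digitChar]

theorem digitChar_eq_two (d : Nat) (h : d < 10) : (Nat.digitChar d = '2') ↔ d = 2 := by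
  interval_cases d <;> simp [Nat.digitChar]

theorem pairsN_concat : ∀ (xs : List Char) (c : Char),
    pairsN (xs ++ [c]) = pairsN xs + (if xs.getLast? = some '3' ∧ c = '2' then 1 else 0) := by
  intro xs
  induction xs with
  | nil => intro c; simp [pairsN]
  | cons a t ih =>
    intro c
    cases t with
    | nil =>
      show pairsN [a, c] = pairsN [a] + _
      have h1 : pairsN [a, c] = (if a = '3' ∧ c = '2' then 1 else 0) + pairsN [c] := rfl
      have h2 : pairsN [c] = 0 := rfl
      have h3 : pairsN [a] = 0 := rfl
      rw [h1, h2, h3]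
      simp
    | cons b t2 =>
      have ih' := ih c
      rw [List.cons_append] at ih'
      show pairsN (a :: b :: (t2 ++ [c])) = _
      have h1 : pairsN (a :: b :: t2) = (if a = '3' ∧ b = '2' then 1 else 0) + pairsN (b :: t2) := rfl
      have h2 : pairsN (a :: b :: (t2 ++ [c])) = (if a = '3' ∧ b = '2' then 1 else 0) + pairsN (b :: (t2 ++ [c])) := rfl
      rw [h1, h2, ih']
      have h3 : (a :: b :: t2).getLast? = (b :: t2).getLast? := by simp
      rw [h3]
      omega

theorem A_eq_pairs : ∀ (m : Nat), thirtyTwos (m : Int) = (pairsN (Nat.toDigits 10 m) : Int) := by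
  intro m
  induction m using Nat.strong_induction_on with
  | _ m ih =>
    by_cases h0 : m = 0
    · subst h0; simp [thirtyTwos, Nat.toDigits, Nat.toDigitsCore, pairsN]
    · rw [thirtyTwos]
      have hc0 : ¬ ((m : Int) = 0) := by exact_mod_cast h0
      have hcneg : ¬ ((m : Int) < 0) := by omega
      rw [if_neg hc0, if_neg hcneg]
      have hfd : PySem.Int.floordiv (m : Int) 10 = ((m / 10 : Nat) : Int) := by
        exact_mod_cast PySem.Int.floordiv_natCast m 10
      have hmod : PySem.Int.mod (m : Int) 10 = ((m % 10 : Nat) : Int) := by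
        exact_mod_cast PySem.Int.mod_natCast m 10
      have hmod2 : PySem.Int.mod ((m / 10 : Nat) : Int) 10 = ((m / 10 % 10 : Nat) : Int) := by
        exact_mod_cast PySem.Int.mod_natCast (m / 10) 10
      simp only [hfd, hmod, hmod2]
      have ihm := ih (m / 10) (Nat.div_lt_self (by omega) (by omega))
      by_cases hbig : m < 10
      · have hd : m / 10 = 0 := Nat.div_eq_of_lt hbig
        rw [toDigits_lt10 m hbig]
        simp only [hd]
        have : ¬ (((m % 10 : Nat) : Int) = 2 ∧ ((0 : Nat) : Int) = 3) := by
          rintro ⟨-, h3⟩; norm_num at h3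
        rw [if_neg this]
        rw [hd] at ihm
        rw [ihm]
        simp [Nat.toDigits, Nat.toDigitsCore, pairsN]
      · rw [toDigits_ge10 m (by omega), pairsN_concat, getLast?_toDigits (m / 10)]
        have e2 : (((m % 10 : Nat) : Int) = 2) ↔ m % 10 = 2 := by omega
        have e3 : (((m / 10 % 10 : Nat) : Int) = 3) ↔ m / 10 % 10 = 3 := by omega
        have d2 : (Nat.digitChar (m % 10) = '2') ↔ m % 10 = 2 :=
          digitChar_eq_two _ (Nat.mod_lt _ (by omega))
        have d3 : (Nat.digitChar (m / 10 % 10) = '3') ↔ m / 10 % 10 = 3 :=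
          digitChar_eq_three _ (Nat.mod_lt _ (by omega))
        rw [ihm]
        by_cases hp : m % 10 = 2 ∧ m / 10 % 10 = 3
        · rw [if_pos (by rw [e2, e3]; exact hp),
              if_pos (by simp only [Option.some.injEq, d3, d2]; exact ⟨hp.2, hp.1⟩)]
          push_cast; ring
        · rw [if_neg (by rw [e2, e3]; exact hp),
              if_neg (by simp only [Option.some.injEq, d3, d2]; exact fun ⟨a, b⟩ => hp ⟨b, a⟩)]
          simp
        
theorem count_go_eq_pairs : ∀ (fuel : Nat) (cs : List Char) (acc : Nat), cs.length ≤ fuel →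
    PySem.Chars.count.go ['3', '2'] fuel cs acc = acc + pairsN cs := by
  intro fuel
  induction fuel with
  | zero =>
    intro cs acc h
    have : cs = [] := by cases cs <;> simp_all
    subst this
    simp [PySem.Chars.count.go, pairsN]
  | succ f ih =>
    intro cs acc h
    match cs with
    | [] => simp [PySem.Chars.count.go, pairsN]
    | a :: t =>
      rw [PySem.Chars.count.go]
      by_cases hp : List.isPrefixOf ['3', '2'] (a :: t) = true
      · rw [if_pos hp]
        obtain ⟨t', rfl, ha⟩ : ∃ t', t = '2' :: t' ∧ a = '3' := by
          match t with
          | [] => simp [List.isPrefixOf] at hp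
          | b :: t' =>
            simp [List.isPrefixOf] at hp
            exact ⟨t', by rw [← hp.2], hp.1.symm⟩
        subst ha
        have hlen : t'.length ≤ f := by simp at h; omega
        rw [show List.drop (['3','2'].length) ('3' :: '2' :: t') = t' from rfl]
        rw [ih t' (acc + 1) hlen]
        have : pairsN ('3' :: '2' :: t') = 1 + pairsN t' := by
          rw [pairsN]
          cases t' with
          | nil => simp [pairsN]
          | cons c r => rw [pairsN]; simp [pairsN]
        rw [this]; omega
      · rw [if_neg hp]
        have hlen : t.length ≤ f := by simp at h; omega
        rw [ih t acc hlen]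
        have : pairsN (a :: t) = pairsN t := by
          cases t with
          | nil => rfl
          | cons b r =>
            rw [pairsN]
            have : ¬ (a = '3' ∧ b = '2') := by
              rintro ⟨rfl, rfl⟩
              simp [List.isPrefixOf] at hp
            rw [if_neg this]
            omega
        rw [this]
  
theorem alt_eq_pairs (m : Nat) : thirtyTwos_alt (m : Int) = (pairsN (Nat.toDigits 10 m) : Int) := by
  unfold thirtyTwos_alt
  rw [PySem.Str.count_eq]
  have hsub : ("32" : String).toList = ['3', '2'] := rfl
  rw [PySem.Int.toList_toStr, hsub]
  have h2 : PySem.Int.toChars (m : Int) = Nat.toDigits 10 m := by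
    simp [PySem.Int.toChars]
  rw [h2, PySem.Chars.count, if_neg (by simp)]
  rw [count_go_eq_pairs _ _ 0 le_rfl]
  simp

-- ===== VERDICT (by name: the statement is the Claim_ definition above) =====
theorem thirtyTwos_spec : Claim_equal_thirtyTwos := by
  intro n _ hpre
  unfold Spec_thirtyTwos
  simp only [Pre_thirtyTwos] at hpre
  obtain ⟨m, rfl⟩ : ∃ m : Nat, n = (m : Int) := ⟨n.toNat, by omega⟩
  rw [A_eq_pairs m, alt_eq_pairs m]
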